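-- pv_equiv track=rewrite | github.com/ingenium21/Hackerrank | Python3/Algorithms/manasaAndStones/manasaAndStones.py | stones
-- ===== SOURCE A (Python) =====
-- def stones(n, a, b):
--     l1 = []
--
--     for i in range(n):
--         temp = 0
--         temp = (i*a) + (n-i-1)*b
--         l1.append(temp)
--
--     ans = []
--     ans = list(set(l1))
--     ans.sort()
--     return ans
-- ===== SOURCE B (Python) =====
-- def stones(n, a, b):
--     if n <= 0:
--         return []
--     if a == b:
--         return [(n - 1) * b]
--     lo, step = (b, a - b) if a > b else (a, b - a)
--     return [(n - 1) * lo + i * step for i in range(n)]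
-- ===== Notes on version B (the rewrite author's own statement) =====
-- stated objective: faster
-- what changed: B recognizes the results form an arithmetic progression with step |a-b| starting at (n-1)*min(a,b) (a single value when a==b), so it emits the sorted deduplicated list directly by a closed formula instead of building all n values, deduplicating through a set and sorting.
import Mathlib
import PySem

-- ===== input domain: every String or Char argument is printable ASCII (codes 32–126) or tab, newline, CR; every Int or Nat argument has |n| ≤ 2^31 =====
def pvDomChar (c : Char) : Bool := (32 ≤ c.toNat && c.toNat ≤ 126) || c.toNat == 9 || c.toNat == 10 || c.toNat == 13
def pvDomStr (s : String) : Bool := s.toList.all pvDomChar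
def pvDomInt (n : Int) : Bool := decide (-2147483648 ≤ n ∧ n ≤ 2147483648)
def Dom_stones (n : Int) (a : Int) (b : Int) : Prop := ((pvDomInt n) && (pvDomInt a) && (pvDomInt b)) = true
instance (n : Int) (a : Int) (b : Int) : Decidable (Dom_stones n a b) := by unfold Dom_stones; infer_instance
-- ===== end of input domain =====

-- B replaces A's build-all/set-dedup/sort pipeline with a closed-form emission of the
-- arithmetic progression of final values, already sorted and deduplicated (objective: faster, measured).

-- ===== PORT A =====
def stones (n : Int) (a : Int) (b : Int) : List Int :=
  let l1 := (PySem.List.pyRange 0 n 1).foldl (fun acc i => acc ++ [(i * a) + (n - i - 1) * b]) []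
  let ans := PySem.Set.ofList l1
  PySem.List.sorted ans (fun x => x) false

-- ===== PORT B =====
def stones_alt (n : Int) (a : Int) (b : Int) : List Int :=
  if n ≤ 0 then []
  else if a = b then [(n - 1) * b]
  else
    let p := if a > b then (b, a - b) else (a, b - a)
    (PySem.List.pyRange 0 n 1).map (fun i => (n - 1) * p.1 + i * p.2)

-- ===== PRECONDITION & SPEC =====
def Spec_stones (n : Int) (a : Int) (b : Int) (out : List Int) : Prop := out = stones_alt n a b
instance (n : Int) (a : Int) (b : Int) (out : List Int) : Decidable (Spec_stones n a b out) := by unfold Spec_stones; infer_instance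

-- ===== CLAIM (what is proved, stated in full; the proofs are below) =====
def Claim_equal_stones : Prop := ∀ (n : Int) (a : Int) (b : Int), Dom_stones n a b → Spec_stones n a b (stones n a b)

-- ===== LEMMAS AND PROOFS =====

-- set(…) of a nonempty constant list is the singleton
lemma ofList_replicate_succ (k : Nat) (c : Int) :
    PySem.Set.ofList (List.replicate (k + 1) c) = [c] := by
  induction k with
  | zero => rfl
  | succ m ih =>
    rw [List.replicate_succ', PySem.Set.ofList_append_singleton, ih]
    simp [PySem.Set.add, PySem.Set.contains]

theorem stones_spec : Claim_equal_stones := by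
  intro n a b _
  unfold Spec_stones stones stones_alt
  simp only [PySem.List.foldl_append_singleton_eq_map, List.nil_append]
  by_cases hn : n ≤ 0
  · rw [PySem.List.pyRange_one_eq_nil hn]
    simp [hn, PySem.Set.ofList_nil, PySem.List.sorted_eq_nil_iff]
  · rw [not_le] at hn
    have hR : PySem.List.pyRange 0 n 1 = List.map (Nat.cast : Nat → Int) (List.range n.toNat) := by
      rw [PySem.List.pyRange_one 0 n, Int.sub_zero]
      exact List.map_congr_left (fun (k : Nat) _ => zero_add (k : Int))
    by_cases hab : a = b
    · -- all stones equal (n-1)*b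
      subst hab
      have hmap : (PySem.List.pyRange 0 n 1).map (fun i => i * a + (n - i - 1) * a)
          = List.replicate n.toNat ((n - 1) * a) := by
        rw [hR, List.map_map]
        have hconst : ∀ k ∈ List.range n.toNat,
            ((fun i => i * a + (n - i - 1) * a) ∘ (Nat.cast : Nat → Int)) k = (n - 1) * a := by
          intro k _
          simp only [Function.comp_apply]
          ring
        rw [List.map_congr_left hconst, List.map_const']
        simp
      rw [hmap]
      obtain ⟨m, hm⟩ : ∃ m, n.toNat = m + 1 := ⟨n.toNat - 1, by omega⟩
      rw [hm, ofList_replicate_succ]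
      rw [if_neg (by omega : ¬ n ≤ 0), if_pos rfl]
      exact PySem.List.sorted_eq_self_of_pairwise _ _ (List.pairwise_singleton _ _)
    · -- a ≠ b : the values are strictly monotone, no duplicates
      have hmap : (PySem.List.pyRange 0 n 1).map (fun i => i * a + (n - i - 1) * b)
          = (PySem.List.pyRange 0 n 1).map (fun i => (n - 1) * b + i * (a - b)) :=
        List.map_congr_left (fun i _ => by ring)
      rw [hmap]
      set ys : List Int := (PySem.List.pyRange 0 n 1).map
          (fun i => (n - 1) * (if a > b then (b, a - b) else (a, b - a)).1
            + i * (if a > b then (b, a - b) else (a, b - a)).2) with hys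
      rw [if_neg (by omega : ¬ n ≤ 0), if_neg hab]
      by_cases hgt : a > b
      · -- increasing: l1 is already sorted and duplicate-free, and equals ys
        have hsame : (PySem.List.pyRange 0 n 1).map (fun i => (n - 1) * b + i * (a - b)) = ys := by
          rw [hys, if_pos hgt]
        rw [hsame]
        have hpw : ys.Pairwise (· < ·) := by
          rw [hys]
          refine List.Pairwise.map _ ?_ (PySem.List.pairwise_lt_pyRange_one 0 n)
          intro x y hxy
          simp only [if_pos hgt]
          nlinarith
        rw [PySem.Set.ofList_eq_self_of_nodup _ (hpw.imp ne_of_lt)]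
        exact PySem.List.sorted_eq_self_of_pairwise _ _ (hpw.imp le_of_lt)
      · -- decreasing: l1 is the reverse of ys
        have hlt : a < b := by omega
        have hrev : (PySem.List.pyRange 0 n 1).map (fun i => (n - 1) * b + i * (a - b))
            = ys.reverse := by
          rw [hys, if_neg hgt, ← List.map_reverse]
          have hrr : (PySem.List.pyRange 0 n 1).reverse = PySem.List.pyRange (n - 1) (-1) (-1) := by
            have h := PySem.List.pyRange_neg_one_eq_reverse (n - 1) (-1)
            norm_num at h
            rw [h]
          rw [hrr, PySem.List.pyRange_neg_one, hR, List.map_map, List.map_map]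
          have h2 : (n - 1 - -1) = n := by ring
          rw [h2]
          refine List.map_congr_left ?_
          intro k _
          simp only [Function.comp_apply]
          ring
        have hpw : ys.Pairwise (· < ·) := by
          rw [hys]
          refine List.Pairwise.map _ ?_ (PySem.List.pairwise_lt_pyRange_one 0 n)
          intro x y hxy
          simp only [if_neg hgt]
          nlinarith
        rw [hrev,
          PySem.Set.ofList_eq_self_of_nodup _ (hpw.reverse.imp ne_of_gt)]
        exact PySem.List.sorted_eq_of_perm_of_pairwise_lt _ _ _ ys.reverse_perm.symm hpw
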